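-- pv_equiv track=rewrite | github.com/meerk40t/meerk40t | tools/generate_help_wiki.py | extract_existing_content
-- ===== SOURCE A (Python) =====
-- def extract_existing_content(existing_content):
--     """Extract the main content from an existing wiki page, excluding the title."""
--     if not existing_content:
--         return ""
--
--     lines = existing_content.split("\n")
--
--     # Skip the title line (first line starting with #)
--     content_lines = []
--     skip_title = True
--
--     for line in lines:
--         if skip_title and line.strip().startswith("#"):
--             skip_title = False
--             continue
--         if not skip_title:
--             content_lines.append(line)
--
--     # Remove leading/trailing empty lines
--     while content_lines and not content_lines[0].strip():
--         content_lines.pop(0)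
--     while content_lines and not content_lines[-1].strip():
--         content_lines.pop()
--
--     return "\n".join(content_lines)
-- ===== SOURCE B (Python) =====
-- def extract_existing_content(existing_content):
--     """Extract the main content from an existing wiki page, excluding the title."""
--     lines = iter(existing_content.split("\n"))
--     for line in lines:
--         if line.strip().startswith("#"):
--             break
--     else:
--         return ""
--     out = []
--     pending = []
--     for line in lines:
--         if line.strip():
--             if out:
--                 out.extend(pending)
--             pending = []
--             out.append(line)
--         else:
--             pending.append(line)
--     return "\n".join(out)
-- ===== Notes on version B (the rewrite author's own statement) =====
-- stated objective: alternative
-- what changed: A collects all post-title lines under a skip flag and then trims blank lines with two pop loops; B breaks at the title line and makes a single pass that buffers runs of blank lines and commits a buffered run only when a later non-blank line arrives, so leading and trailing blank lines are never kept.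
import Mathlib
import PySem

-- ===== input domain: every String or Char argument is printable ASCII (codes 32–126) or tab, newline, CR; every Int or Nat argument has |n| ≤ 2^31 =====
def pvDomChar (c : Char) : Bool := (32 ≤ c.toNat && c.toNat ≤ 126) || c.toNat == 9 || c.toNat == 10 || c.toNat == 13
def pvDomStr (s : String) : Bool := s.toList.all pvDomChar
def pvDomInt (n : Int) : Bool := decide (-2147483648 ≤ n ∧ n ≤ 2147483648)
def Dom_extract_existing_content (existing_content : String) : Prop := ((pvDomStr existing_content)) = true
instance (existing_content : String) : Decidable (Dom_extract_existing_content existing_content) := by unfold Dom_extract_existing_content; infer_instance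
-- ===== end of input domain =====

-- B replaces A's skip-flag fold plus two pop-loops (front and back blank trimming) by a
-- break-at-title pass followed by one pass that buffers blank lines and only commits them
-- before a later non-blank line (objective: alternative one-pass decomposition).


-- ===== PORT A =====
-- line.strip().startswith("#")
def pvTitled (l : String) : Bool := PySem.Str.startswith (PySem.Str.strip l) "#"
-- 'not line.strip()' (truthiness of the stripped string)
def pvBlank (l : String) : Bool := PySem.Str.len (PySem.Str.strip l) == 0
-- existing_content.split("\n")  (sep "\n" ≠ "", so split? is always some)
def pvLines (s : String) : List String := (PySem.Str.split? s "\n").getD []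

-- 'while content_lines and not content_lines[0].strip(): content_lines.pop(0)'
def pvTrimFront : List String → List String
  | [] => []
  | l :: ls => if pvBlank l then pvTrimFront ls else l :: ls

-- 'while content_lines and not content_lines[-1].strip(): content_lines.pop()'
def pvTrimBack (xs : List String) : List String :=
  if h : ((xs.getLast?.map pvBlank).getD false) = true then pvTrimBack xs.dropLast else xs
termination_by xs.length
decreasing_by
  have hne : xs ≠ [] := by intro hn; subst hn; simp at h
  have : 0 < xs.length := List.length_pos_iff.mpr hne
  simp [List.length_dropLast]
  omega

-- the loop body of A's for-loop
def pvStepA (st : Bool × List String) (line : String) : Bool × List String :=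
  if st.1 && pvTitled line then (false, st.2)
  else if !st.1 then (st.1, st.2 ++ [line])
  else st

def extract_existing_content (existing_content : String) : String :=
  if PySem.Str.len existing_content == 0 then ""
  else
    -- the for-loop over state (skip_title, content_lines)
    PySem.Str.join "\n" (pvTrimBack (pvTrimFront
      ((pvLines existing_content).foldl pvStepA (true, ([] : List String))).2))

-- ===== PORT B =====
-- the for/break loop over the iterator: the lines remaining after the first title line, none if no title
def pvSkipTitle : List String → Option (List String)
  | [] => none
  | l :: ls => if pvTitled l then some ls else pvSkipTitle ls

-- the second for-loop over the same iterator, state (out, pending)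
def pvCollect : List String → List String → List String → List String
  | [], out, _ => out
  | l :: ls, out, pending =>
    if pvBlank l then pvCollect ls out (pending ++ [l])
    else pvCollect ls (out ++ (if out.isEmpty then [] else pending) ++ [l]) []

def extract_existing_content_alt (existing_content : String) : String :=
  match pvSkipTitle (pvLines existing_content) with
  | none => ""
  | some rest => PySem.Str.join "\n" (pvCollect rest [] [])

-- ===== PRECONDITION & SPEC =====
def Spec_extract_existing_content (existing_content : String) (out : String) : Prop := out = extract_existing_content_alt existing_content
instance (existing_content : String) (out : String) : Decidable (Spec_extract_existing_content existing_content out) := by unfold Spec_extract_existing_content; infer_instance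

-- ===== CLAIM (what is proved, stated in full; the proofs are below) =====
def Claim_equal_extract_existing_content : Prop := ∀ (existing_content : String), Dom_extract_existing_content existing_content → Spec_extract_existing_content existing_content (extract_existing_content existing_content)

-- ===== LEMMAS AND PROOFS =====

-- canonical right trim: drop trailing blank lines
def pvRTrim (xs : List String) : List String := (xs.reverse.dropWhile pvBlank).reverse

theorem pvTrimFront_eq (xs : List String) : pvTrimFront xs = xs.dropWhile pvBlank := by
  induction xs with
  | nil => rfl
  | cons l ls ih => cases h : pvBlank l <;> simp [pvTrimFront, List.dropWhile, h, ih]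

theorem pvTrimBack_eq (xs : List String) : pvTrimBack xs = pvRTrim xs := by
  induction xs using List.reverseRecOn with
  | nil => rw [pvTrimBack.eq_def]; simp [pvRTrim]
  | append_singleton ys l ih =>
    rw [pvTrimBack.eq_def]
    cases h : pvBlank l with
    | true =>
      rw [dif_pos (by simp [h])]
      rw [List.dropLast_concat, ih]
      simp [pvRTrim, h]
    | false =>
      rw [dif_neg (by simp [h])]
      simp [pvRTrim, h]

theorem dropWhile_append_cons {α : Type} (p : α → Bool) (u v : List α) (x : α)
    (hx : p x = false) : (u ++ x :: v).dropWhile p = u.dropWhile p ++ x :: v := by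
  induction u with
  | nil => simp [hx]
  | cons a u ih => cases h : p a <;> simp [h, ih]

theorem pvRTrim_append_cons (u v : List String) (x : String) (hx : pvBlank x = false) :
    pvRTrim (u ++ x :: v) = u ++ x :: pvRTrim v := by
  unfold pvRTrim
  rw [show (u ++ x :: v).reverse = v.reverse ++ x :: u.reverse by simp,
    dropWhile_append_cons _ _ _ _ hx]
  simp

theorem pvCollect_pending_irrel (xs p q : List String) :
    pvCollect xs [] p = pvCollect xs [] q := by
  induction xs generalizing p q with
  | nil => rfl
  | cons l ls ih => cases h : pvBlank l <;> simp [pvCollect, h] <;> exact ih _ _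

theorem pvCollect_ne_nil (xs out pending : List String) (hout : out ≠ [])
    (hp : ∀ l ∈ pending, pvBlank l = true) :
    pvCollect xs out pending = out ++ pvRTrim (pending ++ xs) := by
  induction xs generalizing out pending with
  | nil =>
    have hnil : pending.reverse.dropWhile pvBlank = [] := by
      rw [List.dropWhile_eq_nil_iff]
      intro x hx; exact hp x (List.mem_reverse.mp hx)
    simp [pvCollect, pvRTrim, hnil]
  | cons l ls ih =>
    obtain ⟨a, as, rfl⟩ := List.exists_cons_of_ne_nil hout
    cases h : pvBlank l with
    | true =>
      rw [pvCollect]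
      simp only [h, if_true]
      rw [ih _ _ (by simp) (by intro x hx
                               rcases List.mem_append.mp hx with h1 | h1
                               · exact hp x h1
                               · simp at h1; subst h1; exact h)]
      simp
    | false =>
      rw [pvCollect]
      simp only [h, Bool.false_eq_true, if_false, List.isEmpty_cons]
      rw [ih _ [] (by simp) (by intro x hx; simp at hx)]
      rw [pvRTrim_append_cons pending ls l h]
      simp
  
theorem pvCollect_spec (xs : List String) :
    pvCollect xs [] [] = pvRTrim (xs.dropWhile pvBlank) := by
  induction xs with
  | nil => simp [pvCollect, pvRTrim]
  | cons l ls ih =>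
    cases h : pvBlank l with
    | true =>
      rw [pvCollect]
      simp only [if_true, List.nil_append, List.dropWhile_cons, h]
      rw [pvCollect_pending_irrel ls [l] [], ih]
    | false =>
      rw [pvCollect]
      simp only [Bool.false_eq_true, if_false, List.isEmpty_nil, if_true,
        List.nil_append, List.dropWhile_cons, h]
      rw [pvCollect_ne_nil ls [l] [] (by simp) (by intro x hx; simp at hx)]
      rw [show (l :: ls) = [] ++ l :: ls by rfl, pvRTrim_append_cons [] ls l h]
      simp

theorem pvStepA_false (acc : List String) (m : String) :
    pvStepA (false, acc) m = (false, acc ++ [m]) := by simp [pvStepA]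

theorem pvStepA_true (acc : List String) (l : String) :
    pvStepA (true, acc) l = if pvTitled l then (false, acc) else (true, acc) := by
  cases h : pvTitled l <;> simp [pvStepA, h]

-- A's fold with skip_title already false appends every remaining line
theorem foldA_false (xs acc : List String) :
    xs.foldl pvStepA (false, acc) = (false, acc ++ xs) := by
  induction xs generalizing acc with
  | nil => simp
  | cons m ms ih => rw [List.foldl_cons, pvStepA_false, ih]; simp

-- A's skip_title fold leaves exactly the lines after the first title line
theorem foldA_skip (xs acc0 : List String) :
    (xs.foldl pvStepA (true, acc0)).2 =
      (match pvSkipTitle xs with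
       | none => acc0
       | some rest => acc0 ++ rest) := by
  induction xs generalizing acc0 with
  | nil => rfl
  | cons l ls ih =>
    rw [List.foldl_cons, pvStepA_true]
    cases h : pvTitled l with
    | true => simp [pvSkipTitle, h, foldA_false]
    | false => simpa [pvSkipTitle, h] using ih acc0

theorem extract_eq (s : String) :
    extract_existing_content s = extract_existing_content_alt s := by
  by_cases hs : (PySem.Str.len s == 0) = true
  · have hempty : s = "" := by
      apply String.toList_eq_nil_iff.mp
      apply List.eq_nil_of_length_eq_zero
      have := beq_iff_eq.mp hs
      have h2 : PySem.Str.len s = (s.toList.length : Int) := by simp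
      omega
    subst hempty
    rfl
  · unfold extract_existing_content extract_existing_content_alt
    rw [if_neg hs]
    rw [pvTrimFront_eq, pvTrimBack_eq, foldA_skip]
    cases h : pvSkipTitle (pvLines s) with
    | none => rfl
    | some rest => simp [pvCollect_spec]

-- ===== VERDICT (by name: the statement is the Claim_ definition above) =====
theorem extract_existing_content_spec : Claim_equal_extract_existing_content := by
  intro s _
  unfold Spec_extract_existing_content
  exact extract_eq s
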